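-- pv_equiv track=rewrite | github.com/nur-aris07/KlasifikasiSentimenBromo | 1_Homepage.py | getSentimen
-- ===== SOURCE A (Python) =====
-- def getSentimen(data):
--     positif = 0
--     negatif = 0
--     for sentimen in data:
--         if sentimen=="POSITIF":
--             positif += 1
--         elif sentimen=="NEGATIF":
--             negatif += 1
--     return [positif,negatif]
-- ===== SOURCE B (Python) =====
-- def getSentimen(data):
--     lst = list(data)
--     return [lst.count("POSITIF"), lst.count("NEGATIF")]
-- ===== Notes on version B (the rewrite author's own statement) =====
-- stated objective: idiomatic
-- what changed: Replaces the single conditional accumulating loop with materializing the input and two separate list.count scans.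
import Mathlib
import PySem

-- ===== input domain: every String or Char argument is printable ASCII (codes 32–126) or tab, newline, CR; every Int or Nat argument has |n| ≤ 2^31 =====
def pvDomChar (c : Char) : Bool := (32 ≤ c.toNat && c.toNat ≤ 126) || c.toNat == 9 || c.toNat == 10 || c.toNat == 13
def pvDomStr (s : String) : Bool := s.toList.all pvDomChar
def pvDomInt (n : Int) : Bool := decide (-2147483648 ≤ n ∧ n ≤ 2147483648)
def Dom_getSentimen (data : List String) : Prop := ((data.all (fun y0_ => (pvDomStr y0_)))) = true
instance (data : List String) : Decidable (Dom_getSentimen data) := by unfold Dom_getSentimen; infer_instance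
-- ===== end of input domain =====

-- B replaces A's single conditional accumulating loop with two separate count scans of the materialized list (idiomatic; same cost).
-- ===== PORT A =====
-- Port of A: one pass with two conditional accumulators.
def getSentimen (data : List String) : List Int :=
  let p := data.foldl (fun (acc : Int × Int) sentimen =>
    if sentimen == "POSITIF" then (acc.1 + 1, acc.2)
    else if sentimen == "NEGATIF" then (acc.1, acc.2 + 1)
    else acc) (0, 0)
  [p.1, p.2]

-- ===== PORT B =====
-- Port of B: two separate count scans (lst.count).
def getSentimen_alt (data : List String) : List Int :=
  [PySem.List.count data "POSITIF", PySem.List.count data "NEGATIF"]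

-- ===== PRECONDITION & SPEC =====
def Spec_getSentimen (data : List String) (out : List Int) : Prop := out = getSentimen_alt data
instance (data : List String) (out : List Int) : Decidable (Spec_getSentimen data out) := by unfold Spec_getSentimen; infer_instance

-- ===== CLAIM (what is proved, stated in full; the proofs are below) =====
def Claim_equal_getSentimen : Prop := ∀ (data : List String), Dom_getSentimen data → Spec_getSentimen data (getSentimen data)

-- ===== LEMMAS AND PROOFS =====

-- ===== VERDICT (by name: the statement is the Claim_ definition above) =====
theorem fold_pair_counts (data : List String) (a b : Int) :
    data.foldl (fun (acc : Int × Int) sentimen =>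
      if sentimen == "POSITIF" then (acc.1 + 1, acc.2)
      else if sentimen == "NEGATIF" then (acc.1, acc.2 + 1)
      else acc) (a, b)
    = (a + data.count "POSITIF", b + data.count "NEGATIF") := by
  induction data generalizing a b with
  | nil => simp
  | cons x xs ih =>
    simp only [List.foldl_cons]
    split_ifs with hp hn
    · rw [ih]
      rw [beq_iff_eq] at hp; subst hp
      simp [List.count_cons, Prod.ext_iff]
      push_cast; ring
    · rw [ih]
      rw [beq_iff_eq] at hn; subst hn
      simp [List.count_cons, Prod.ext_iff]
      push_cast; ring
    · rw [ih]
      rw [beq_iff_eq] at hp hn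
      simp [List.count_cons, hp, hn]

theorem getSentimen_spec : Claim_equal_getSentimen := by
  intro data _
  unfold Spec_getSentimen getSentimen getSentimen_alt
  rw [fold_pair_counts]
  simp [PySem.List.count_eq]
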